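-- pv_equiv track=rewrite | github.com/dmeyer4569/Spartahack11 | backend-laptop/stringman.py | extract_quantity_and_item
-- ===== SOURCE A (Python) =====
-- NUM_WORDS = {
--     "zero":0,"one":1,"two":2,"three":3,"four":4,"five":5,"six":6,"seven":7,"eight":8,"nine":9,
--     "ten":10,"eleven":11,"twelve":12,"thirteen":13,"fourteen":14,"fifteen":15,
--     "sixteen":16,"seventeen":17,"eighteen":18,"nineteen":19,
--     "twenty":20,"thirty":30,"forty":40,"fifty":50
-- }
--
-- def extract_quantity_and_item(chunk):
--     words = chunk.lower().split()
--
--     if "expires" not in words: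
--         return None, None
--
--     exp_index = words.index("expires")
--
--     qty_index = None
--     for i in range(exp_index - 1, -1, -1):
--         if words[i] in NUM_WORDS:
--             qty_index = i
--             break
--
--     if qty_index is None:
--         return None, None
--
--     quantity = NUM_WORDS[words[qty_index]]
--
--     item_words = words[qty_index + 1:exp_index]
--
--     noise = {"uh", "a", "the", "okay", "gonna", "know", "it's"}
--     item_words = [w for w in item_words if w not in noise]
--
--     item = " ".join(item_words).strip()
--     return quantity, item if item else None
-- ===== SOURCE B (Python) =====
-- NUM_WORDS = {
--     "zero":0,"one":1,"two":2,"three":3,"four":4,"five":5,"six":6,"seven":7,"eight":8,"nine":9,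
--     "ten":10,"eleven":11,"twelve":12,"thirteen":13,"fourteen":14,"fifteen":15,
--     "sixteen":16,"seventeen":17,"eighteen":18,"nineteen":19,
--     "twenty":20,"thirty":30,"forty":40,"fifty":50
-- }
--
-- NOISE = {"uh", "a", "the", "okay", "gonna", "know", "it's"}
--
-- def extract_quantity_and_item(chunk):
--     # single forward pass: remember the last number word seen, stop at the first "expires"
--     words = chunk.lower().split()
--     exp_index = None
--     qty_index = None
--     for i, w in enumerate(words):
--         if w == "expires":
--             exp_index = i
--             break
--         if w in NUM_WORDS:
--             qty_index = i
--     if exp_index is None or qty_index is None: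
--         return None, None
--     quantity = NUM_WORDS[words[qty_index]]
--     item = " ".join(w for w in words[qty_index + 1:exp_index] if w not in NOISE).strip()
--     return quantity, item if item else None
-- ===== Notes on version B (the rewrite author's own statement) =====
-- stated objective: alternative
-- what changed: Replaces A's three-step lookup (membership test, first-index search, then a separate backward scan for the quantity word) with a single stateful forward pass over the word list that records the last number-word index and stops at the break word.
import Mathlib
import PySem

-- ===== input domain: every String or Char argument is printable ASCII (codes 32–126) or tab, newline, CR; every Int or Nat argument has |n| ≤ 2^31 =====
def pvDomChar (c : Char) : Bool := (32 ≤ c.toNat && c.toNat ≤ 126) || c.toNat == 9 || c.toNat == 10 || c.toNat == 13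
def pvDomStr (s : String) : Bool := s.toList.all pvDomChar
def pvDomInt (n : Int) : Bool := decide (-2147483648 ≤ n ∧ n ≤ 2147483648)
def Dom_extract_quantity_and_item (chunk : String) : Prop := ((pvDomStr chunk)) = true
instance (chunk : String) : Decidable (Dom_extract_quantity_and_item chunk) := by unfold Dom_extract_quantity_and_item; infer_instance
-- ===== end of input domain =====

-- B replaces A's membership test + first-index lookup + backward quantity scan by a single
-- forward pass over the words (alternative decomposition, same cost).
-- Shared module constants (identical literals in Source A and Source B):

def numWords : PySem.Dict String Int := PySem.Dict.ofList [
  ("zero",0),("one",1),("two",2),("three",3),("four",4),("five",5),("six",6),("seven",7),("eight",8),("nine",9),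
  ("ten",10),("eleven",11),("twelve",12),("thirteen",13),("fourteen",14),("fifteen",15),
  ("sixteen",16),("seventeen",17),("eighteen",18),("nineteen",19),
  ("twenty",20),("thirty",30),("forty",40),("fifty",50)]

def noiseWords : PySem.Set String :=
  PySem.Set.ofList ["uh", "a", "the", "okay", "gonna", "know", "it's"]

-- ===== PORT A =====
-- A's loop 'for i in range(exp_index - 1, -1, -1): if words[i] in NUM_WORDS: break'.
-- words[i] is always in range when A runs this (0 ≤ i < exp_index ≤ len(words)); the .getD ""
-- default is never hit there ("" is no key of NUM_WORDS).
def pvBackScan (ws : List String) (i : Int) : Option Int :=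
  if h : i < 0 then none
  else if numWords.contains ((PySem.List.pyGet? ws i).getD "") then some i
  else pvBackScan ws (i - 1)
termination_by (i + 1).toNat
decreasing_by omega

def extract_quantity_and_item (chunk : String) : Option Int × Option String :=
  let words := PySem.Str.split₀ (PySem.Str.lower chunk)
  if "expires" ∈ words then
    match PySem.List.index? words "expires" with
    | none => (none, none)  -- unreachable: "expires" ∈ words
    | some expIndex =>
      match pvBackScan words ((expIndex : Int) - 1) with
      | none => (none, none)
      | some qtyIndex =>
        let quantity := (numWords.get? ((PySem.List.pyGet? words qtyIndex).getD "")).getD 0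
        let itemWords := PySem.List.slice words (some (qtyIndex + 1)) (some ((expIndex : Int)))
        let itemWords := itemWords.filter (fun w => !(noiseWords.contains w))
        let item := PySem.Str.strip (PySem.Str.join " " itemWords)
        (some quantity, if item = "" then none else some item)
  else (none, none)

-- ===== PORT B =====
-- Source B's single forward pass: stop at the first "expires" (returning its index and the last
-- number-word index seen so far), else remember the index of each number word.
def pvFwdScan (ws : List String) (i : Int) (qty : Option Int) : Option (Int × Option Int) :=
  match ws with
  | [] => none
  | w :: rest =>
    if w = "expires" then some (i, qty)
    else pvFwdScan rest (i + 1) (if numWords.contains w then some i else qty)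

def extract_quantity_and_item_alt (chunk : String) : Option Int × Option String :=
  let words := PySem.Str.split₀ (PySem.Str.lower chunk)
  match pvFwdScan words 0 none with
  | none => (none, none)
  | some (_, none) => (none, none)
  | some (expIndex, some qtyIndex) =>
    let quantity := (numWords.get? ((PySem.List.pyGet? words qtyIndex).getD "")).getD 0
    let item := PySem.Str.strip (PySem.Str.join " "
      ((PySem.List.slice words (some (qtyIndex + 1)) (some expIndex)).filter
        (fun w => !(noiseWords.contains w))))
    (some quantity, if item = "" then none else some item)

-- ===== PRECONDITION & SPEC =====
def Spec_extract_quantity_and_item (chunk : String) (out : Option Int × Option String) : Prop := out = extract_quantity_and_item_alt chunk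
instance (chunk : String) (out : Option Int × Option String) : Decidable (Spec_extract_quantity_and_item chunk out) := by unfold Spec_extract_quantity_and_item; infer_instance

-- ===== CLAIM (what is proved, stated in full; the proofs are below) =====
def Claim_equal_extract_quantity_and_item : Prop := ∀ (chunk : String), Dom_extract_quantity_and_item chunk → Spec_extract_quantity_and_item chunk (extract_quantity_and_item chunk)

-- ===== LEMMAS AND PROOFS =====

-- The forward scan started at position k of W (with accumulator = A's backward scan over W[0..k-1])
-- returns exactly (absolute index of the first "expires" in the suffix, A's backward scan below it).
theorem pvFwdScan_eq (ws : List String) : ∀ (W : List String) (k : Nat),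
    W.drop k = ws →
    pvFwdScan ws (k : Int) (pvBackScan W ((k : Int) - 1)) =
      match PySem.List.index? ws "expires" with
      | none => none
      | some j => some (((k + j : Nat) : Int), pvBackScan W (((k + j : Nat) : Int) - 1)) := by
  induction ws with
  | nil =>
    intro W k _
    simp [pvFwdScan]
  | cons w rest ih =>
    intro W k h
    have hk : k < W.length := by
      by_contra hge
      rw [List.drop_eq_nil_of_le (by omega)] at h
      exact List.cons_ne_nil _ _ h.symm
    have hwk : W[k] = w := by
      have := (List.getElem_cons_drop hk).trans h
      exact (List.cons_eq_cons.mp this).1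
    have hrest : W.drop (k + 1) = rest := by
      have := (List.getElem_cons_drop hk).trans h
      exact (List.cons_eq_cons.mp this).2
    by_cases hexp : w = "expires"
    · subst hexp
      rw [PySem.List.index?_cons_self]
      simp [pvFwdScan]
    · have hacc : (if numWords.contains w then some (k : Int) else pvBackScan W ((k : Int) - 1))
          = pvBackScan W (((k + 1 : Nat) : Int) - 1) := by
        have h1 : (((k + 1 : Nat) : Int) - 1) = (k : Int) := by push_cast; ring
        rw [h1]
        conv_rhs => rw [pvBackScan]
        have h0 : ¬ ((k : Int) < 0) := by omega
        simp [h0, List.getElem?_eq_getElem hk, hwk]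
      have hstep : pvFwdScan (w :: rest) (k : Int) (pvBackScan W ((k : Int) - 1))
          = pvFwdScan rest (((k + 1 : Nat) : Int)) (pvBackScan W (((k + 1 : Nat) : Int) - 1)) := by
        rw [pvFwdScan]
        simp only [hexp, if_false, ← hacc]
        norm_num
      rw [hstep, ih W (k + 1) hrest, PySem.List.index?_cons_of_ne rest hexp]
      cases PySem.List.index? rest "expires" with
      | none => simp
      | some j =>
        have hj : k + 1 + j = k + (j + 1) := by omega
        simp [hj]

-- ===== VERDICT (by name: the statement is the Claim_ definition above) =====
theorem extract_quantity_and_item_spec : Claim_equal_extract_quantity_and_item := by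
  intro chunk _
  unfold Spec_extract_quantity_and_item extract_quantity_and_item extract_quantity_and_item_alt
  dsimp only
  have hscan := pvFwdScan_eq (PySem.Str.split₀ (PySem.Str.lower chunk))
    (PySem.Str.split₀ (PySem.Str.lower chunk)) 0 List.drop_zero
  have hb : pvBackScan (PySem.Str.split₀ (PySem.Str.lower chunk)) (((0 : Nat) : Int) - 1) = none := by
    rw [pvBackScan]; simp
  rw [hb] at hscan
  simp only [Nat.cast_zero, zero_add] at hscan
  rw [hscan]
  by_cases hmem : "expires" ∈ PySem.Str.split₀ (PySem.Str.lower chunk)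
  · rw [if_pos hmem]
    obtain ⟨e, he⟩ := Option.isSome_iff_exists.mp ((PySem.List.index?_isSome_iff _ _).mpr hmem)
    rw [he]
    dsimp only
    cases hq : pvBackScan (PySem.Str.split₀ (PySem.Str.lower chunk)) ((e : Int) - 1) with
    | none => rfl
    | some q => rfl
  · rw [if_neg hmem, (PySem.List.index?_eq_none_iff _ _).mpr hmem]
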